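-- pv_equiv track=rewrite | github.com/666Syimyk/gesture-translator | backend/scripts/bootstrap_phrase_pack_signs.py | trim_empty_edges
-- ===== SOURCE A (Python) =====
-- def trim_empty_edges(frames):
--     start = 0
--     end = len(frames)
--
--     while start < end and not has_visible_content(frames[start]):
--         start += 1
--
--     while end > start and not has_visible_content(frames[end - 1]):
--         end -= 1
--
--     return frames[start:end] if start < end else frames
--
-- def has_visible_content(frame):
--     quality = frame.get("quality") or {}
--     return any(
--         bool(quality.get(key))
--         for key in ("has_left_hand", "has_right_hand", "has_face", "has_pose")
--     )
-- ===== SOURCE B (Python) =====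
-- def trim_empty_edges(frames):
--     visible = [i for i, f in enumerate(frames) if has_visible_content(f)]
--     if not visible:
--         return frames
--     return frames[visible[0]:visible[-1] + 1]
--
--
-- def has_visible_content(frame):
--     quality = frame.get("quality") or {}
--     return any(
--         bool(quality.get(key))
--         for key in ("has_left_hand", "has_right_hand", "has_face", "has_pose")
--     )
-- ===== Notes on version B (the rewrite author's own statement) =====
-- stated objective: simpler
-- what changed: A's two index-based while loops shrinking start/end are replaced by one enumerate pass collecting the indices of visible frames, returning frames[visible[0]:visible[-1]+1] (or frames unchanged when none are visible).
import Mathlib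
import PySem

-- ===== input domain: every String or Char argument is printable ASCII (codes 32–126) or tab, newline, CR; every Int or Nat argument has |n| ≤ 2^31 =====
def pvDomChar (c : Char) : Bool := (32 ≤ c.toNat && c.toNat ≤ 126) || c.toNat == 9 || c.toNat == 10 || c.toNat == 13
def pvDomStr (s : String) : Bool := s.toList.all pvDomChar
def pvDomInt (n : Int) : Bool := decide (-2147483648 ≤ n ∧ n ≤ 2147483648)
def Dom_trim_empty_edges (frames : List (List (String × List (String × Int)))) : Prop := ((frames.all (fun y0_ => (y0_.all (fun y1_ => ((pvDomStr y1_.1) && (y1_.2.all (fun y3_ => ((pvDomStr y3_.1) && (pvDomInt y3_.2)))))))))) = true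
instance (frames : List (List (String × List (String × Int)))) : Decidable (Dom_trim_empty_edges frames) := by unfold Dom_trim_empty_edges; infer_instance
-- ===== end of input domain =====

-- B replaces A's two end-trimming while loops by one enumerate pass collecting visible indices (objective: simpler).

-- ===== PORT A =====
-- has_visible_content: 'frame.get("quality") or {}' — a stored empty dict and a missing key both yield {} = [].
def pvHasVisibleContent (frame : List (String × List (String × Int))) : Bool :=
  let quality : List (String × Int) := (List.lookup "quality" frame).getD []
  ["has_left_hand", "has_right_hand", "has_face", "has_pose"].any (fun key =>
    match List.lookup key quality with
    | some n => n != 0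
    | none => false)

-- first while loop: advance start while the frame there has no visible content
-- (start < e ≤ frames.length throughout, so getD is the exact Python frames[start])
def pvTrimStart (frames : List (List (String × List (String × Int)))) (e start : Nat) : Nat :=
  if h : start < e ∧ pvHasVisibleContent (frames.getD start []) = false then
    pvTrimStart frames e (start + 1)
  else start
termination_by e - start
decreasing_by omega

-- second while loop: retreat end while the frame at end-1 has no visible content
def pvTrimEnd (frames : List (List (String × List (String × Int)))) (start e : Nat) : Nat :=
  if h : start < e ∧ pvHasVisibleContent (frames.getD (e - 1) []) = false then
    pvTrimEnd frames start (e - 1)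
  else e
termination_by e
decreasing_by omega

def trim_empty_edges (frames : List (List (String × List (String × Int)))) : List (List (String × List (String × Int))) :=
  let start := pvTrimStart frames frames.length 0
  let e := pvTrimEnd frames start frames.length
  if start < e then PySem.List.slice frames (some (start : Int)) (some (e : Int)) else frames

-- ===== PORT B =====
def pvHasVisibleContentB (frame : List (String × List (String × Int))) : Bool :=
  let quality : List (String × Int) := (List.lookup "quality" frame).getD []
  ["has_left_hand", "has_right_hand", "has_face", "has_pose"].any (fun key =>
    match List.lookup key quality with
    | some n => n != 0
    | none => false)

def trim_empty_edges_alt (frames : List (List (String × List (String × Int)))) : List (List (String × List (String × Int))) :=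
  let visible : List Int :=
    ((PySem.List.enumerate frames 0).filter (fun p => pvHasVisibleContentB p.2)).map (·.1)
  match visible with
  | [] => frames
  | i :: rest =>
      PySem.List.slice frames (some i) (some ((i :: rest).getLast (List.cons_ne_nil _ _) + 1))

-- ===== PRECONDITION & SPEC =====
def Spec_trim_empty_edges (frames : List (List (String × List (String × Int)))) (out : List (List (String × List (String × Int)))) : Prop := out = trim_empty_edges_alt frames
instance (frames : List (List (String × List (String × Int)))) (out : List (List (String × List (String × Int)))) : Decidable (Spec_trim_empty_edges frames out) := by unfold Spec_trim_empty_edges; infer_instance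

-- ===== CLAIM (what is proved, stated in full; the proofs are below) =====
def Claim_equal_trim_empty_edges : Prop := ∀ (frames : List (List (String × List (String × Int)))), Dom_trim_empty_edges frames → Spec_trim_empty_edges frames (trim_empty_edges frames)

-- ===== LEMMAS AND PROOFS =====

theorem pvHVC_eq : pvHasVisibleContentB = pvHasVisibleContent := rfl

theorem pvTrimStart_all_false (frames : List (List (String × List (String × Int)))) (e start : Nat)
    (hse : start ≤ e)
    (h : ∀ i, start ≤ i → i < e → pvHasVisibleContent (frames.getD i []) = false) :
    pvTrimStart frames e start = e := by
  induction hn : e - start generalizing start with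
  | zero =>
      have : start = e := by omega
      rw [pvTrimStart]
      simp [this]
  | succ n ih =>
      rw [pvTrimStart]
      have hlt : start < e := by omega
      rw [dif_pos ⟨hlt, h start le_rfl hlt⟩]
      exact ih (start + 1) (by omega) (fun i h1 h2 => h i (by omega) h2) (by omega)

theorem pvTrimStart_first (frames : List (List (String × List (String × Int)))) (e start k : Nat)
    (hsk : start ≤ k) (hke : k < e)
    (hP : pvHasVisibleContent (frames.getD k []) = true)
    (hmin : ∀ i, start ≤ i → i < k → pvHasVisibleContent (frames.getD i []) = false) :
    pvTrimStart frames e start = k := by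
  induction hn : k - start generalizing start with
  | zero =>
      have hk : start = k := by omega
      rw [pvTrimStart]
      subst hk
      rw [dif_neg (fun hc => by rw [hP] at hc; simp at hc)]
  | succ n ih =>
      rw [pvTrimStart]
      rw [dif_pos ⟨by omega, hmin start le_rfl (by omega)⟩]
      exact ih (start + 1) (by omega) (fun i h1 h2 => hmin i (by omega) h2) (by omega)

theorem pvTrimEnd_all_false (frames : List (List (String × List (String × Int)))) (start e : Nat)
    (hse : start ≤ e)
    (h : ∀ i, start ≤ i → i < e → pvHasVisibleContent (frames.getD i []) = false) :
    pvTrimEnd frames start e = start := by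
  induction hn : e - start generalizing e with
  | zero =>
      have : e = start := by omega
      rw [pvTrimEnd]
      simp [this]
  | succ n ih =>
      rw [pvTrimEnd]
      have hlt : start < e := by omega
      rw [dif_pos ⟨hlt, h (e - 1) (by omega) (by omega)⟩]
      exact ih (e - 1) (by omega) (fun i h1 h2 => h i h1 (by omega)) (by omega)

theorem pvTrimEnd_last (frames : List (List (String × List (String × Int)))) (start e k : Nat)
    (hsk : start ≤ k) (hke : k < e)
    (hP : pvHasVisibleContent (frames.getD k []) = true)
    (hmax : ∀ i, k < i → i < e → pvHasVisibleContent (frames.getD i []) = false) :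
    pvTrimEnd frames start e = k + 1 := by
  induction hn : e - (k + 1) generalizing e with
  | zero =>
      have hk : e = k + 1 := by omega
      rw [pvTrimEnd]
      subst hk
      rw [dif_neg (fun hc => by rw [Nat.add_sub_cancel, hP] at hc; simp at hc)]
  | succ n ih =>
      rw [pvTrimEnd]
      rw [dif_pos ⟨by omega, hmax (e - 1) (by omega) (by omega)⟩]
      exact ih (e - 1) (by omega) (fun i h1 h2 => hmax i h1 (by omega)) (by omega)

-- B's visible index list equals the Nat-indexed filter of range, cast to Int
theorem pvVisible_eq (xs : List (List (String × List (String × Int)))) (s : Nat) :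
    ((PySem.List.enumerate xs (s : Int)).filter (fun p => pvHasVisibleContent p.2)).map (·.1)
      = ((List.range xs.length).filter (fun j => pvHasVisibleContent (xs.getD j []))).map
          (fun j => ((s + j : Nat) : Int)) := by
  induction xs generalizing s with
  | nil => simp [PySem.List.enumerate_nil]
  | cons x xs ih =>
      have hs1 : ((s : Int) + 1) = ((s + 1 : Nat) : Int) := by push_cast; ring
      rw [PySem.List.enumerate_cons, List.length_cons, List.range_succ_eq_map]
      simp only [List.filter_cons, List.getD_cons_zero, List.filter_map,
        Function.comp_def]
      by_cases hx : pvHasVisibleContent x = true <;>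
        simp only [hx, if_true, Bool.false_eq_true, if_false, List.map_cons, List.map_map,
          Function.comp_def] <;>
        rw [hs1, ih (s + 1)]
      · congr 1
        apply List.map_congr_left
        intro j hj
        push_cast
        ring
      · apply List.map_congr_left
        intro j hj
        push_cast
        ring

theorem pv_head_le {a : Nat} {t : List Nat} (hp : (a :: t).Pairwise (· < ·)) :
    ∀ x ∈ a :: t, a ≤ x := by
  intro x hx
  rcases List.mem_cons.mp hx with h | h
  · omega
  · exact le_of_lt ((List.pairwise_cons.mp hp).1 x h)

theorem pv_mem_le_getLast? {l : List Nat} (hp : l.Pairwise (· < ·)) {x y : Nat}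
    (hx : x ∈ l) (hy : l.getLast? = some y) : x ≤ y := by
  induction l with
  | nil => simp at hx
  | cons a t ih =>
      rcases List.mem_cons.mp hx with rfl | hxt
      · cases t with
        | nil => simp at hy; omega
        | cons b t' =>
            have hyt : (b :: t').getLast? = some y := by
              simpa [List.getLast?_cons_cons] using hy
            have hymem : y ∈ b :: t' := List.mem_of_getLast? hyt
            have := (List.pairwise_cons.mp hp).1 y hymem
            omega
      · cases t with
        | nil => simp at hxt
        | cons b t' =>
            exact ih (List.pairwise_cons.mp hp).2 hxt
              (by simpa [List.getLast?_cons_cons] using hy)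

-- membership in the visible-index list
theorem pv_mem_V {frames : List (List (String × List (String × Int)))} {j : Nat} :
    j ∈ (List.range frames.length).filter (fun j => pvHasVisibleContent (frames.getD j []))
      ↔ j < frames.length ∧ pvHasVisibleContent (frames.getD j []) = true := by
  simp [List.mem_filter, List.mem_range]

theorem pv_V_pairwise (frames : List (List (String × List (String × Int)))) :
    ((List.range frames.length).filter
      (fun j => pvHasVisibleContent (frames.getD j []))).Pairwise (· < ·) :=
  (List.pairwise_lt_range).filter _

-- ===== VERDICT (by name: the statement is the Claim_ definition above) =====
theorem trim_empty_edges_spec : Claim_equal_trim_empty_edges := by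
  intro frames _
  unfold Spec_trim_empty_edges trim_empty_edges trim_empty_edges_alt
  have hvis :
      ((PySem.List.enumerate frames 0).filter (fun p => pvHasVisibleContentB p.2)).map (·.1)
        = ((List.range frames.length).filter
            (fun j => pvHasVisibleContent (frames.getD j []))).map (fun j => ((0 + j : Nat) : Int)) := by
    rw [pvHVC_eq]
    exact_mod_cast pvVisible_eq frames 0
  set V := (List.range frames.length).filter (fun j => pvHasVisibleContent (frames.getD j [])) with hVdef
  cases hV : V with
  | nil =>
      -- no visible frame: A's loops meet, A returns frames; B's visible list is empty
      have hall : ∀ i, 0 ≤ i → i < frames.length → pvHasVisibleContent (frames.getD i []) = false := by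
        intro i _ hi
        by_contra hne
        have : i ∈ V := pv_mem_V.mpr ⟨hi, by revert hne; cases pvHasVisibleContent (frames.getD i []) <;> simp⟩
        rw [hV] at this
        simp at this
      have h1 : pvTrimStart frames frames.length 0 = frames.length :=
        pvTrimStart_all_false _ _ _ (Nat.zero_le _) hall
      have h2 : pvTrimEnd frames frames.length frames.length = frames.length :=
        pvTrimEnd_all_false _ _ _ le_rfl (by omega)
      simp only [h1, h2, lt_irrefl, if_false]
      rw [hvis, hV]
      simp
  | cons k0 rest =>
      have hpair : V.Pairwise (· < ·) := pv_V_pairwise frames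
      have hk0 : k0 ∈ V := by rw [hV]; simp
      obtain ⟨hk0n, hk0P⟩ := pv_mem_V.mp hk0
      set kl := V.getLast (by rw [hV]; simp) with hkl
      have hklV : kl ∈ V := List.getLast_mem _
      obtain ⟨hkln, hklP⟩ := pv_mem_V.mp hklV
      have hk0kl : k0 ≤ kl := by
        rw [hV] at hpair hklV
        exact pv_head_le hpair kl hklV
      have hmin : ∀ i, 0 ≤ i → i < k0 → pvHasVisibleContent (frames.getD i []) = false := by
        intro i _ hi
        by_contra hne
        have hiV : i ∈ V := pv_mem_V.mpr ⟨by omega, by revert hne; cases pvHasVisibleContent (frames.getD i []) <;> simp⟩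
        rw [hV] at hpair hiV
        have := pv_head_le hpair i hiV
        omega
      have hmax : ∀ i, kl < i → i < frames.length → pvHasVisibleContent (frames.getD i []) = false := by
        intro i hi hin
        by_contra hne
        have hiV : i ∈ V := pv_mem_V.mpr ⟨hin, by revert hne; cases pvHasVisibleContent (frames.getD i []) <;> simp⟩
        have hy : V.getLast? = some kl := by
          rw [hkl]; exact List.getLast?_eq_getLast_of_ne_nil _
        have := pv_mem_le_getLast? hpair hiV hy
        omega
      have h1 : pvTrimStart frames frames.length 0 = k0 :=
        pvTrimStart_first _ _ _ _ (Nat.zero_le _) hk0n hk0P hmin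
      have h2 : pvTrimEnd frames k0 frames.length = kl + 1 :=
        pvTrimEnd_last _ _ _ _ hk0kl hkln hklP hmax
      simp only [h1, h2]
      rw [if_pos (by omega)]
      rw [hvis, hV]
      simp only [List.map_cons]
      have hlastmap :
          ((((0 + k0 : Nat) : Int)) :: rest.map (fun j => ((0 + j : Nat) : Int))).getLast (List.cons_ne_nil _ _)
            = ((0 + kl : Nat) : Int) := by
        rw [List.getLast_eq_iff_getLast?_eq_some]
        have hmap : (((0 + k0 : Nat) : Int)) :: rest.map (fun j => ((0 + j : Nat) : Int))
            = (k0 :: rest).map (fun j => ((0 + j : Nat) : Int)) := by simp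
        have hlast : (k0 :: rest).getLast? = some kl := by
          rw [← hV, hkl]
          exact List.getLast?_eq_getLast_of_ne_nil _
        rw [hmap, List.getLast?_map, hlast]
        rfl
      rw [hlastmap]
      congr 2
      · push_cast; ring
      · push_cast; omega
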